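-- pv_equiv track=rewrite | github.com/miliar/Code_Jam_Webscraper | solutions_python/Problem_201/1620.py | func
-- ===== SOURCE A (Python) =====
-- def func(n,k):
--     if k<=1:
--         mx = int(n/2)
--         mi = int(n/2-(n+1)%2)
--         return (mx,mi)
--     elif k>=n:
--         return (0,0)
--     elif n%2==0:
--         return func(int((n/2)-k%2),int(k/2))
--     else:
--         return func(int((n/2)),int(k/2))
-- ===== SOURCE B (Python) =====
-- def func(n, k):
--     # Iterative version: the tail recursion becomes a while loop over state (n, k).
--     while 1 < k < n:
--         n = int(n / 2) - k % 2 if n % 2 == 0 else int(n / 2)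
--         k = int(k / 2)
--     if k <= 1:
--         return (int(n / 2), int(n / 2) - (n + 1) % 2)
--     return (0, 0)
-- ===== Notes on version B (the rewrite author's own statement) =====
-- stated objective: simpler
-- what changed: Replaces the tail recursion with an iterative while loop over mutable state (n, k), with the base-case formulas applied once after the loop exits.
import Mathlib
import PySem

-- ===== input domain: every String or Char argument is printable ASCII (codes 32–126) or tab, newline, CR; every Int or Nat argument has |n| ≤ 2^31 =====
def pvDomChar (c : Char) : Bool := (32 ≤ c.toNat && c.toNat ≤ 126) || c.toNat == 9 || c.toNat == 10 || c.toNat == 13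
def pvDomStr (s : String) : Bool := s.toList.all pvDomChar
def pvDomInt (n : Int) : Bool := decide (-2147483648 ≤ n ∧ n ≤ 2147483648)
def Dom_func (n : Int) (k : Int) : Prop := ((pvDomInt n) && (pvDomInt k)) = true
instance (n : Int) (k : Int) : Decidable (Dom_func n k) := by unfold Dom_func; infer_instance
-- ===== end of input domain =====

-- B rewrites A's tail recursion as a while loop over state (n, k); same cost, plainer shape.
-- Python's int(x/2) truncates toward zero; on |n| ≤ 2^31 the float x/2 is exact, so it is Int.tdiv _ 2.

-- ===== PORT A =====
-- int(n/2 - k%2) with n even equals n.tdiv 2 - k%2 (the subtraction is between exact integers);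
-- int(n/2 - (n+1)%2) equals n.tdiv 2 - (n+1)%2 (when n is odd the second term is 0).
def func (n : Int) (k : Int) : Int × Int :=
  if k ≤ 1 then
    (n.tdiv 2, n.tdiv 2 - PySem.Int.mod (n + 1) 2)
  else if k ≥ n then
    (0, 0)
  else if PySem.Int.mod n 2 = 0 then
    func (n.tdiv 2 - PySem.Int.mod k 2) (k.tdiv 2)
  else
    func (n.tdiv 2) (k.tdiv 2)
termination_by k.toNat
decreasing_by
  all_goals
  · simp only [not_le] at *
    have h2 : k.tdiv 2 = k / 2 := Int.tdiv_eq_ediv_of_nonneg (by omega)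
    omega

-- ===== PORT B =====
-- the while loop: run while 1 < k < n, returning the final state (n, k)
def funcAltLoop (n : Int) (k : Int) : Int × Int :=
  if 1 < k ∧ k < n then
    funcAltLoop (if PySem.Int.mod n 2 = 0 then n.tdiv 2 - PySem.Int.mod k 2 else n.tdiv 2)
      (k.tdiv 2)
  else
    (n, k)
termination_by k.toNat
decreasing_by
  · obtain ⟨_hk, _⟩ := by assumption
    have h2 : k.tdiv 2 = k / 2 := Int.tdiv_eq_ediv_of_nonneg (by omega)
    omega

def func_alt (n : Int) (k : Int) : Int × Int :=
  let s := funcAltLoop n k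
  if s.2 ≤ 1 then
    (s.1.tdiv 2, s.1.tdiv 2 - PySem.Int.mod (s.1 + 1) 2)
  else
    (0, 0)

-- ===== PRECONDITION & SPEC =====
def Spec_func (n : Int) (k : Int) (out : Int × Int) : Prop := out = func_alt n k
instance (n : Int) (k : Int) (out : Int × Int) : Decidable (Spec_func n k out) := by unfold Spec_func; infer_instance

-- ===== CLAIM (what is proved, stated in full; the proofs are below) =====
def Claim_equal_func : Prop := ∀ (n : Int) (k : Int), Dom_func n k → Spec_func n k (func n k)

-- ===== LEMMAS AND PROOFS =====
theorem func_eq_alt (n k : Int) : func n k = func_alt n k := by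
  rw [func_alt]
  induction n, k using func.induct with
  | case1 n k hk =>
    rw [func, funcAltLoop, if_neg (show ¬((1:Int) < k ∧ k < n) by omega), if_pos hk]
    simp [hk]
  | case2 n k hk hn =>
    rw [func, funcAltLoop, if_neg (show ¬((1:Int) < k ∧ k < n) by omega), if_neg hk, if_pos hn]
    simp [show ¬(k ≤ 1) from hk]
  | case3 n k hk hn hm ih =>
    rw [func, funcAltLoop, if_neg hk, if_neg hn, if_pos hm,
      if_pos (show (1:Int) < k ∧ k < n by omega), if_pos hm]
    exact ih
  | case4 n k hk hn hm ih =>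
    rw [func, funcAltLoop, if_neg hk, if_neg hn, if_neg hm,
      if_pos (show (1:Int) < k ∧ k < n by omega), if_neg hm]
    exact ih

-- ===== VERDICT (by name: the statement is the Claim_ definition above) =====
theorem func_spec : Claim_equal_func := by
  intro n k _
  unfold Spec_func
  exact func_eq_alt n k
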